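-- pv_equiv track=rewrite | github.com/saketh-exe/python | sign alterations.py | continual_homogeneous_sign_sums
-- ===== SOURCE A (Python) =====
-- def continual_homogeneous_sign_sums(arr):
--     sums = []
--     current_sum = 0
--     current_sign = None
--
--     for num in arr:
--         if current_sign is None:
--             current_sign = 1 if num > 0 else -1
--             current_sum = num
--         elif num * current_sign > 0:
--             current_sum += num
--         else:
--             sums.append(current_sum)
--             current_sign = 1 if num > 0 else -1
--             current_sum = num
--
--     sums.append(current_sum)  # Add the last sum
--
--     return sums
-- ===== SOURCE B (Python) =====
-- def continual_homogeneous_sign_sums(arr):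
--     res = []
--     start = 0
--     for i in range(1, len(arr)):
--         if not (arr[i] * (1 if arr[i - 1] > 0 else -1) > 0):
--             res.append(sum(arr[start:i]))
--             start = i
--     res.append(sum(arr[start:]))
--     return res
-- ===== Notes on version B (the rewrite author's own statement) =====
-- stated objective: alternative
-- what changed: B replaces A's running-accumulator state machine (current_sum plus a None-initialised current_sign carried through one fold over the elements) by boundary detection: it scans index pairs (i-1,i) to find where a new sign run starts and emits each run's total as a slice sum arr[start:i], with a final unconditional slice sum covering the last run and the empty input.
import Mathlib
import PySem

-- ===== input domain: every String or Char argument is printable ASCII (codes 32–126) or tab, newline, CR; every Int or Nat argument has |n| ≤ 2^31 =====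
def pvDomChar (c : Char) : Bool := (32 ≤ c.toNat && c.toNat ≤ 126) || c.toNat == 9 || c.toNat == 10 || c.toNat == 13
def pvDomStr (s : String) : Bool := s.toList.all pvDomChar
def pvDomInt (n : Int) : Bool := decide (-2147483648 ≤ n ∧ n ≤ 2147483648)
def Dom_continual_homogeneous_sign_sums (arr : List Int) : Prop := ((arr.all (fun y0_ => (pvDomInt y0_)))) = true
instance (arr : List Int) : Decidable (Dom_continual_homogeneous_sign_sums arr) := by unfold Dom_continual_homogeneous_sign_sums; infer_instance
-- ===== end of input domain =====

-- B computes the same run sums by detecting sign-run boundaries between adjacent elements and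
-- summing slices, instead of A's running accumulator with a None-initialised sign state ("alternative", same cost).

-- ===== PORT A =====
-- loop state: (sums, current_sum, current_sign)
def pvStepA (st : List Int × Int × Option Int) (num : Int) : List Int × Int × Option Int :=
  match st.2.2 with
  | none => (st.1, num, some (if num > 0 then 1 else -1))
  | some sg =>
      if num * sg > 0 then (st.1, st.2.1 + num, some sg)
      else (st.1 ++ [st.2.1], num, some (if num > 0 then 1 else -1))

def continual_homogeneous_sign_sums (arr : List Int) : List Int :=
  let st := arr.foldl pvStepA ([], 0, none)
  st.1 ++ [st.2.1]

-- ===== PORT B =====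
-- loop state: (res, start)
def pvStepB (arr : List Int) (st : List Int × Int) (i : Int) : List Int × Int :=
  if ¬ (PySem.List.pyGetD arr i 0 * (if PySem.List.pyGetD arr (i - 1) 0 > 0 then 1 else -1) > 0) then
    (st.1 ++ [(PySem.List.slice arr (some st.2) (some i)).sum], i)
  else st

def continual_homogeneous_sign_sums_alt (arr : List Int) : List Int :=
  let st := (PySem.List.pyRange 1 (arr.length : Int) 1).foldl (pvStepB arr) ([], 0)
  st.1 ++ [(PySem.List.slice arr (some st.2) none).sum]

-- ===== PRECONDITION & SPEC =====
def Spec_continual_homogeneous_sign_sums (arr : List Int) (out : List Int) : Prop := out = continual_homogeneous_sign_sums_alt arr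
instance (arr : List Int) (out : List Int) : Decidable (Spec_continual_homogeneous_sign_sums arr out) := by unfold Spec_continual_homogeneous_sign_sums; infer_instance

-- ===== CLAIM (what is proved, stated in full; the proofs are below) =====
def Claim_equal_continual_homogeneous_sign_sums : Prop := ∀ (arr : List Int), Dom_continual_homogeneous_sign_sums arr → Spec_continual_homogeneous_sign_sums arr (continual_homogeneous_sign_sums arr)

-- ===== LEMMAS AND PROOFS =====

lemma pvStepB_snd (arr : List Int) (st : List Int × Int) (i : Int) :
    (pvStepB arr st i).2 = st.2 ∨ (pvStepB arr st i).2 = i := by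
  unfold pvStepB
  split <;> split
  all_goals first
    | exact Or.inr rfl
    | exact Or.inl rfl

lemma pvStepB_append (arr : List Int) (x : Int) (st : List Int × Int) (i : Int)
    (h1 : 1 ≤ i) (h2 : i < (arr.length : Int)) (h0 : 0 ≤ st.2) (hs : st.2 ≤ (arr.length : Int)) :
    pvStepB (arr ++ [x]) st i = pvStepB arr st i := by
  have e1 : PySem.List.pyGetD (arr ++ [x]) i 0 = PySem.List.pyGetD arr i 0 := by
    rw [PySem.List.pyGetD_eq_getElem (arr ++ [x]) 0 (by omega) (by simp; omega),
        PySem.List.pyGetD_eq_getElem arr 0 (by omega) (by omega)]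
    exact List.getElem_append_left (by omega)
  have e2 : PySem.List.pyGetD (arr ++ [x]) (i - 1) 0 = PySem.List.pyGetD arr (i - 1) 0 := by
    rw [PySem.List.pyGetD_eq_getElem (arr ++ [x]) 0 (by omega) (by simp; omega),
        PySem.List.pyGetD_eq_getElem arr 0 (by omega) (by omega)]
    exact List.getElem_append_left (by omega)
  have e3 : PySem.List.slice (arr ++ [x]) (some st.2) (some i)
      = PySem.List.slice arr (some st.2) (some i) := by
    rw [PySem.List.slice_toNat (arr ++ [x]) h0 (by omega), PySem.List.slice_toNat arr h0 (by omega)]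
    rw [List.drop_append_of_le_length (by omega), List.take_append_of_le_length (by simp; omega)]
  unfold pvStepB
  rw [e1, e2, e3]

lemma pvFoldB_append (l : List Int) : ∀ (arr : List Int) (x : Int) (st : List Int × Int),
    (∀ i ∈ l, 1 ≤ i ∧ i < (arr.length : Int)) → 0 ≤ st.2 → st.2 ≤ (arr.length : Int) →
    l.foldl (pvStepB (arr ++ [x])) st = l.foldl (pvStepB arr) st := by
  induction l with
  | nil => intros; rfl
  | cons i l ih =>
    intro arr x st h h0 hs
    have hi := h i (List.mem_cons_self)
    simp only [List.foldl_cons]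
    rw [pvStepB_append arr x st i hi.1 hi.2 h0 hs]
    rcases pvStepB_snd arr st i with hsnd | hsnd <;>
      exact ih arr x _ (fun j hj => h j (List.mem_cons_of_mem _ hj)) (by omega) (by omega)

lemma pvInvAux : ∀ (arr : List Int) (x : Int),
    ((arr ++ [x]).foldl pvStepA ([], 0, none)).1
      = ((PySem.List.pyRange 1 ((arr ++ [x]).length : Int) 1).foldl (pvStepB (arr ++ [x])) ([], 0)).1 ∧
    ((arr ++ [x]).foldl pvStepA ([], 0, none)).2.1
      = (PySem.List.slice (arr ++ [x])
          (some ((PySem.List.pyRange 1 ((arr ++ [x]).length : Int) 1).foldl (pvStepB (arr ++ [x])) ([], 0)).2) none).sum ∧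
    ((arr ++ [x]).foldl pvStepA ([], 0, none)).2.2 = some (if x > 0 then 1 else -1) ∧
    0 ≤ ((PySem.List.pyRange 1 ((arr ++ [x]).length : Int) 1).foldl (pvStepB (arr ++ [x])) ([], 0)).2 ∧
    ((PySem.List.pyRange 1 ((arr ++ [x]).length : Int) 1).foldl (pvStepB (arr ++ [x])) ([], 0)).2
      < ((arr ++ [x]).length : Int) := by
  intro arr
  induction arr using List.reverseRecOn with
  | nil =>
    intro x
    simp [pvStepA, PySem.List.pyRange_one_eq_nil (by norm_num : (1:Int) ≤ 1),
      PySem.List.slice_from _ (le_refl 0)]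
  | append_singleton l y ih =>
    intro x
    obtain ⟨h1, h2, h3, h4, h5⟩ := ih y
    set w : List Int := l ++ [y] with hw
    have hwne : w ≠ [] := by simp [hw]
    have hL1 : 1 ≤ (w.length : Int) := by simp [hw]
    -- A side: one more step
    have hA : (w ++ [x]).foldl pvStepA ([], 0, none)
        = pvStepA (w.foldl pvStepA ([], 0, none)) x := by
      rw [List.foldl_append]; rfl
    -- B side: one more index
    have hcast : (((w ++ [x]).length : Nat) : Int) = (w.length : Int) + 1 := by
      simp
    have hB : (PySem.List.pyRange 1 (((w ++ [x]).length : Nat) : Int) 1).foldl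
          (pvStepB (w ++ [x])) ([], 0)
        = pvStepB (w ++ [x])
            ((PySem.List.pyRange 1 (w.length : Int) 1).foldl (pvStepB w) ([], 0))
            (w.length : Int) := by
      rw [hcast, PySem.List.pyRange_one_succ_right hL1, List.foldl_append,
        pvFoldB_append _ w x ([], 0)
          (fun i hi => by
            rw [PySem.List.mem_pyRange_one] at hi; exact ⟨hi.1, hi.2⟩)
          (by norm_num) (by norm_num)]
      rfl
    set sA := w.foldl pvStepA ([], 0, none) with hsA
    set tB := (PySem.List.pyRange 1 (w.length : Int) 1).foldl (pvStepB w) ([], 0) with htB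
    -- the two probed elements
    have g1 : PySem.List.pyGetD (w ++ [x]) (w.length : Int) 0 = x := by
      rw [PySem.List.pyGetD_eq_getElem (w ++ [x]) 0 (by omega) (by simp)]
      simp
    have g2 : PySem.List.pyGetD (w ++ [x]) ((w.length : Int) - 1) 0 = y := by
      rw [PySem.List.pyGetD_eq_getElem (w ++ [x]) 0 (by omega) (by simp)]
      have hln : ((w.length : Int) - 1).toNat = l.length := by simp [hw]
      simp only [hln]
      rw [List.getElem_append_left (by simp [hw])]
      simp [hw]
    have hdrop : (w ++ [x]).drop tB.2.toNat = w.drop tB.2.toNat ++ [x] :=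
      List.drop_append_of_le_length (by omega)
    have hstepA : pvStepA sA x =
        if x * (if y > 0 then (1:Int) else -1) > 0
        then (sA.1, sA.2.1 + x, some (if y > 0 then (1:Int) else -1))
        else (sA.1 ++ [sA.2.1], x, some (if x > 0 then (1:Int) else -1)) := by
      unfold pvStepA; rw [h3]
    have hstepB : pvStepB (w ++ [x]) tB (w.length : Int) =
        if x * (if y > 0 then (1:Int) else -1) > 0 then tB
        else (tB.1 ++ [(PySem.List.slice (w ++ [x]) (some tB.2) (some (w.length : Int))).sum],
              (w.length : Int)) := by
      unfold pvStepB; rw [g1, g2]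
      by_cases hc : x * (if y > 0 then (1:Int) else -1) > 0
      · rw [if_neg (not_not_intro hc), if_pos hc]
      · rw [if_pos hc, if_neg hc]
    rw [hA, hB, hstepA, hstepB]
    by_cases hc : x * (if y > 0 then (1:Int) else -1) > 0
    · rw [if_pos hc, if_pos hc]
      dsimp only
      refine ⟨h1, ?_, ?_, by omega, by omega⟩
      · rw [PySem.List.slice_from _ h4, hdrop, List.sum_append]
        rw [PySem.List.slice_from _ h4] at h2
        simp [h2]
      · by_cases hy : y > 0
        · have hx : x > 0 := by rw [if_pos hy, mul_one] at hc; exact hc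
          rw [if_pos hy, if_pos hx]
        · have hx : ¬ x > 0 := by rw [if_neg hy, mul_neg_one] at hc; omega
          rw [if_neg hy, if_neg hx]
    · rw [if_neg hc, if_neg hc]
      dsimp only
      have hS : sA.2.1 = (PySem.List.slice (w ++ [x]) (some tB.2) (some (w.length : Int))).sum := by
        rw [PySem.List.slice_toNat _ h4 (by omega), hdrop,
          List.take_append_of_le_length (by simp only [List.length_drop]; omega),
          List.take_of_length_le (by simp only [List.length_drop]; omega)]
        rw [PySem.List.slice_from _ h4] at h2
        exact h2
      refine ⟨by rw [h1, hS], ?_, rfl, by omega, by omega⟩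
      rw [PySem.List.slice_from _ (by omega : (0:Int) ≤ ((w.length : Nat) : Int))]
      simp

-- ===== VERDICT (by name: the statement is the Claim_ definition above) =====
theorem continual_homogeneous_sign_sums_spec : Claim_equal_continual_homogeneous_sign_sums := by
  intro arr _
  unfold Spec_continual_homogeneous_sign_sums
  rcases arr.eq_nil_or_concat with rfl | ⟨l, x, rfl⟩
  · decide
  · simp only [List.concat_eq_append]
    obtain ⟨hh1, hh2, -, -, -⟩ := pvInvAux l x
    simp only [continual_homogeneous_sign_sums, continual_homogeneous_sign_sums_alt]
    rw [hh1, hh2]
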